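-- pv_equiv track=rewrite | github.com/AlexanderLu98/DetectingLiteraryToolsInRapLyric | tester5.py | group_syllables
-- ===== SOURCE A (Python) =====
-- def group_syllables(dataset):
--     new_dataset = []
--     current_entry = None
--
--     for entry in dataset:
--         line_number, word, phonetic, rhyme_group = entry
--
--         if current_entry is None:
--             # Initialize the current entry
--             current_entry = (line_number, word, [phonetic], rhyme_group)
--         elif current_entry[0] == line_number and current_entry[1] == word:
--             # If the same word and line, append the syllable to the current entry
--             current_entry[2].append(phonetic)
--         else:
--             # If a new word or line, add the current entry to the new dataset
--             joined_phonetic = ' '.join(current_entry[2])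
--             new_dataset.append((current_entry[0], current_entry[1], joined_phonetic, current_entry[3]))
--             current_entry = (line_number, word, [phonetic], rhyme_group)
--
--     if current_entry is not None:
--         # Add the last current entry to the new dataset
--         joined_phonetic = ' '.join(current_entry[2])
--         new_dataset.append((current_entry[0], current_entry[1], joined_phonetic, current_entry[3]))
--
--     return new_dataset
-- ===== SOURCE B (Python) =====
-- def group_syllables(dataset):
--     new_dataset = []
--     i, n = 0, len(dataset)
--     while i < n:
--         line_number, word, phonetic, rhyme_group = dataset[i]
--         parts = [phonetic]
--         j = i + 1
--         while j < n and dataset[j][0] == line_number and dataset[j][1] == word: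
--             parts.append(dataset[j][2])
--             j += 1
--         new_dataset.append((line_number, word, ' '.join(parts), rhyme_group))
--         i = j
--     return new_dataset
-- ===== Notes on version B (the rewrite author's own statement) =====
-- stated objective: alternative
-- what changed: Replaces the stateful accumulator loop (Optional current_entry mutated per row, with a trailing flush branch) by a two-pointer run scanner: an outer index finds the start of each (line, word) run, an inner scan advances to its end and collects the phonetics, and each finished run is emitted immediately, so no mutable pending entry or post-loop flush exists.
import Mathlib
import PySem

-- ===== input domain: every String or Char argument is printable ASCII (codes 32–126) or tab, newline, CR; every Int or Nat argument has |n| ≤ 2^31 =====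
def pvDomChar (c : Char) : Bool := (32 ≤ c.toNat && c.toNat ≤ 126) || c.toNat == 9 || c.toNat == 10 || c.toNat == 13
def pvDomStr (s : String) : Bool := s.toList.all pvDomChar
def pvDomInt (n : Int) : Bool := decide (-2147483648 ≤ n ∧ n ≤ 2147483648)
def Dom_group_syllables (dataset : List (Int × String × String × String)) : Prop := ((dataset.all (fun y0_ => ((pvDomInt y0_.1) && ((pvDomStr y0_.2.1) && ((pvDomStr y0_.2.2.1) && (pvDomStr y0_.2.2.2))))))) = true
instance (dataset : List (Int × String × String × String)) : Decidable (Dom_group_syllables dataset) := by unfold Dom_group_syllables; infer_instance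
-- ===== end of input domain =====

-- B replaces A's mutable current_entry accumulator (with its trailing flush branch) by a
-- two-pointer run scanner that emits each maximal (line, word) run directly; alternative
-- decomposition, same cost; return value only (neither mutates its argument).

-- ===== PORT A =====
-- loop body of A over state (new_dataset, current_entry)
def pvStepA (st : List (Int × String × String × String) × Option (Int × String × List String × String))
    (entry : Int × String × String × String) :
    List (Int × String × String × String) × Option (Int × String × List String × String) :=
  match st, entry with
  | (acc, none), (l, w, p, r) => (acc, some (l, w, [p], r))
  | (acc, some (cl, cw, cps, cr)), (l, w, p, r) =>
    if cl = l ∧ cw = w then (acc, some (cl, cw, cps ++ [p], cr))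
    else (acc ++ [(cl, cw, PySem.Str.join " " cps, cr)], some (l, w, [p], r))

def group_syllables (dataset : List (Int × String × String × String)) : List (Int × String × String × String) :=
  match dataset.foldl pvStepA ([], none) with
  | (acc, none) => acc
  | (acc, some (cl, cw, cps, cr)) => acc ++ [(cl, cw, PySem.Str.join " " cps, cr)]

-- ===== PORT B =====
-- B's run key test for the inner while loop
def pvSameKey (l : Int) (w : String) (e : Int × String × String × String) : Bool :=
  e.1 == l && e.2.1 == w

-- B: outer loop = one step per maximal run; inner while loop = takeWhile/dropWhile scan
def group_syllables_alt : List (Int × String × String × String) → List (Int × String × String × String)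
  | [] => []
  | (l, w, p, r) :: rest =>
    let run := rest.takeWhile (pvSameKey l w)
    (l, w, PySem.Str.join " " (p :: run.map (fun e => e.2.2.1)), r) ::
      group_syllables_alt (rest.dropWhile (pvSameKey l w))
termination_by ds => ds.length
decreasing_by
  simpa [Nat.lt_succ_iff] using List.length_dropWhile_le (pvSameKey l w) rest

-- ===== PRECONDITION & SPEC =====
def Spec_group_syllables (dataset : List (Int × String × String × String)) (out : List (Int × String × String × String)) : Prop := out = group_syllables_alt dataset
instance (dataset : List (Int × String × String × String)) (out : List (Int × String × String × String)) : Decidable (Spec_group_syllables dataset out) := by unfold Spec_group_syllables; infer_instance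

-- ===== CLAIM (what is proved, stated in full; the proofs are below) =====
def Claim_equal_group_syllables : Prop := ∀ (dataset : List (Int × String × String × String)), Dom_group_syllables dataset → Spec_group_syllables dataset (group_syllables dataset)

-- ===== LEMMAS AND PROOFS =====

-- Invariant of A's fold: with current entry (cl, cw, cps, cr) pending, finishing the fold
-- yields acc, then the pending entry completed by the current run, then B on the remainder.
theorem pvLoopA_inv (ds : List (Int × String × String × String))
    (acc : List (Int × String × String × String)) (cl : Int) (cw : String)
    (cps : List String) (cr : String) :
    (match ds.foldl pvStepA (acc, some (cl, cw, cps, cr)) with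
      | (a, none) => a
      | (a, some (l, w, ps, r)) => a ++ [(l, w, PySem.Str.join " " ps, r)]) =
    acc ++ (cl, cw, PySem.Str.join " " (cps ++ (ds.takeWhile (pvSameKey cl cw)).map (fun e => e.2.2.1)), cr)
      :: group_syllables_alt (ds.dropWhile (pvSameKey cl cw)) := by
  induction ds generalizing acc cl cw cps cr with
  | nil => simp [group_syllables_alt]
  | cons e rest ih =>
    obtain ⟨l, w, p, r⟩ := e
    cases hb : pvSameKey cl cw (l, w, p, r) with
    | true =>
      have h' : l = cl ∧ w = cw := by simpa [pvSameKey] using hb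
      obtain ⟨h1, h2⟩ := h'
      subst h1; subst h2
      simp only [List.foldl_cons, pvStepA, and_self, if_true]
      rw [ih]
      simp [hb]
    | false =>
      have h : ¬(cl = l ∧ cw = w) := by
        intro hc
        rw [hc.1, hc.2] at hb
        simp [pvSameKey] at hb
      simp only [List.foldl_cons, pvStepA, if_neg h]
      rw [ih]
      simp [group_syllables_alt, hb]

-- ===== VERDICT (by name: the statement is the Claim_ definition above) =====
theorem group_syllables_spec : Claim_equal_group_syllables := by
  intro dataset _
  unfold Spec_group_syllables group_syllables
  cases dataset with
  | nil => simp [group_syllables_alt]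
  | cons e rest =>
    obtain ⟨l, w, p, r⟩ := e
    simp only [List.foldl_cons, pvStepA]
    rw [pvLoopA_inv]
    simp [group_syllables_alt]
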